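-- pv_equiv track=rewrite | github.com/gooderno1/LarkSync | apps/backend/src/services/docx_service.py | _unique_anchor_pairs
-- ===== SOURCE A (Python) =====
-- from collections import Counter
--
-- def _unique_anchor_pairs(
--     current_sigs: list[str], desired_sigs: list[str]
-- ) -> list[tuple[int, int]]:
--     current_counts = Counter(current_sigs)
--     desired_counts = Counter(desired_sigs)
--     current_unique = {
--         sig: idx for idx, sig in enumerate(current_sigs) if current_counts[sig] == 1
--     }
--     desired_unique = {
--         sig: idx for idx, sig in enumerate(desired_sigs) if desired_counts[sig] == 1
--     }
--     anchors = [
--         (current_unique[sig], desired_unique[sig])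
--         for sig in current_unique.keys() & desired_unique.keys()
--     ]
--     anchors.sort(key=lambda item: item[0])
--     return anchors
-- ===== SOURCE B (Python) =====
-- from collections import Counter
--
-- def _unique_anchor_pairs(
--     current_sigs: list[str], desired_sigs: list[str]
-- ) -> list[tuple[int, int]]:
--     current_counts = Counter(current_sigs)
--     desired_counts = Counter(desired_sigs)
--     desired_unique = {
--         sig: idx for idx, sig in enumerate(desired_sigs) if desired_counts[sig] == 1
--     }
--     anchors = []
--     for idx, sig in enumerate(current_sigs):
--         if current_counts[sig] == 1 and sig in desired_unique:
--             anchors.append((idx, desired_unique[sig]))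
--     return anchors
-- ===== Notes on version B (the rewrite author's own statement) =====
-- stated objective: simpler
-- what changed: Replaces A's current-side unique dict, key-set intersection and final sort with a single ordered pass over enumerate(current_sigs) that emits (idx, desired_unique[sig]) directly, already sorted by current index.
import Mathlib
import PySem

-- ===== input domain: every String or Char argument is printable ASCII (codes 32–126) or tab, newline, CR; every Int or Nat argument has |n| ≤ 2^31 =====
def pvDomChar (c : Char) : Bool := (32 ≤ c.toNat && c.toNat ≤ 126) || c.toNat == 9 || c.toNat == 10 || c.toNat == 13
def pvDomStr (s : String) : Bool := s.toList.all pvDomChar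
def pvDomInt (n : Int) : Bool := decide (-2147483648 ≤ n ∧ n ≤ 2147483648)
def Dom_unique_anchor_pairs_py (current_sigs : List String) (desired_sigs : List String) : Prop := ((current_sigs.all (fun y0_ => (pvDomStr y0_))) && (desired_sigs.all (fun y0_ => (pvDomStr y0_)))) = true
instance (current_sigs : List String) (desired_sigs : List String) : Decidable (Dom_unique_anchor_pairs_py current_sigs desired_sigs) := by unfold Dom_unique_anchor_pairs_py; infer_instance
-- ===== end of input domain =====

-- B replaces A's current-side unique dict, key-set intersection and final sort by one ordered pass
-- over enumerate(current_sigs) that emits each pair directly (objective: simpler).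

-- ===== PORT A =====
-- shared helper: the comprehension '{sig: idx for idx, sig in enumerate(sigs) if Counter(sigs)[sig] == 1}'
-- (both Pythons contain this comprehension verbatim for desired_sigs; A also applies it to current_sigs)
def pvUniqueDict (sigs : List String) : PySem.Dict String Int :=
  (PySem.List.enumerate sigs).foldl
    (fun d p => if (PySem.Dict.counter sigs).getD p.2 0 == 1 then d.insert p.2 p.1 else d)
    PySem.Dict.empty

def unique_anchor_pairs_py (current_sigs : List String) (desired_sigs : List String) : List (Int × Int) :=
  let current_unique := pvUniqueDict current_sigs
  let desired_unique := pvUniqueDict desired_sigs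
  -- 'current_unique.keys() & desired_unique.keys()': iterating this set is order-safe here because the
  -- mapped pairs have pairwise-distinct first components and are sorted by them immediately afterwards
  let inter := PySem.Set.inter (PySem.Set.ofList current_unique.keys) desired_unique.keys
  let anchors := inter.map (fun sig => (current_unique.getD sig 0, desired_unique.getD sig 0))
  PySem.List.sorted anchors (fun item => item.1)

-- ===== PORT B =====
def unique_anchor_pairs_py_alt (current_sigs : List String) (desired_sigs : List String) : List (Int × Int) :=
  let current_counts := PySem.Dict.counter current_sigs
  let desired_unique := pvUniqueDict desired_sigs
  (PySem.List.enumerate current_sigs).foldl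
    (fun anchors p =>
      if current_counts.getD p.2 0 == 1 && desired_unique.contains p.2 then
        anchors ++ [(p.1, desired_unique.getD p.2 0)]
      else anchors) []

-- ===== PRECONDITION & SPEC =====
def Spec_unique_anchor_pairs_py (current_sigs : List String) (desired_sigs : List String) (out : List (Int × Int)) : Prop := out = unique_anchor_pairs_py_alt current_sigs desired_sigs
instance (current_sigs : List String) (desired_sigs : List String) (out : List (Int × Int)) : Decidable (Spec_unique_anchor_pairs_py current_sigs desired_sigs out) := by unfold Spec_unique_anchor_pairs_py; infer_instance

-- ===== CLAIM (what is proved, stated in full; the proofs are below) =====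
def Claim_equal_unique_anchor_pairs_py : Prop := ∀ (current_sigs : List String) (desired_sigs : List String), Dom_unique_anchor_pairs_py current_sigs desired_sigs → Spec_unique_anchor_pairs_py current_sigs desired_sigs (unique_anchor_pairs_py current_sigs desired_sigs)

-- ===== LEMMAS AND PROOFS =====

-- the common closed form both ports are reduced to
def pvCF (current_sigs : List String) (desired_sigs : List String) : List (Int × Int) :=
  ((PySem.List.enumerate current_sigs).filter
      (fun p => (pvUniqueDict desired_sigs).contains p.2
        && ((PySem.Dict.counter current_sigs).getD p.2 0 == 1))).map
    (fun p => (p.1, (pvUniqueDict desired_sigs).getD p.2 0))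

-- the conditional-insert loop of the comprehension, for fresh keys occurring once, appends its items in order
lemma pvFoldInsertItems (P : String → Bool) :
    ∀ (l : List (Int × String)) (d : PySem.Dict String Int),
      (∀ p ∈ l, P p.2 = true → d.contains p.2 = false ∧ (l.map Prod.snd).count p.2 = 1) →
      (l.foldl (fun d p => if P p.2 then d.insert p.2 p.1 else d) d).items
        = d.items ++ (l.filter (fun p => P p.2)).map (fun p => (p.2, p.1)) := by
  intro l
  induction l with
  | nil => intro d _; simp
  | cons x t ih =>
    intro d h
    by_cases hx : P x.2 = true
    · have hfresh : d.contains x.2 = false := (h x (by simp) hx).1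
      have step : (t.foldl (fun d p => if P p.2 then d.insert p.2 p.1 else d) (d.insert x.2 x.1)).items
          = (d.insert x.2 x.1).items ++ (t.filter (fun p => P p.2)).map (fun p => (p.2, p.1)) := by
        apply ih
        intro q hq hPq
        have hq' := h q (by simp [hq]) hPq
        have hmemq : 0 < (t.map Prod.snd).count q.2 :=
          List.count_pos_iff.mpr (List.mem_map_of_mem hq)
        have hne : x.2 ≠ q.2 := by
          intro hEq
          have h2 : ((x :: t).map Prod.snd).count q.2 = (t.map Prod.snd).count q.2 + 1 := by
            simp [hEq]
          have := hq'.2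
          omega
        constructor
        · rw [PySem.Dict.contains_insert]
          have hne2 : ¬ q.2 = x.2 := fun hh => hne hh.symm
          simp [hne2, hq'.1]
        · have := hq'.2
          simpa [List.count_cons, hne] using this
      simp only [List.foldl_cons, List.filter_cons, hx, if_true]
      rw [step, PySem.Dict.items_insert_of_not_contains d x.1 hfresh]
      simp
    · have hx' : P x.2 = false := by simpa using hx
      simp only [List.foldl_cons, List.filter_cons, hx', Bool.false_eq_true, if_false]
      apply ih
      intro q hq hPq
      have hq' := h q (by simp [hq]) hPq
      have hne : x.2 ≠ q.2 := by
        intro hEq; rw [← hEq] at hPq; exact hx hPq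
      refine ⟨hq'.1, ?_⟩
      have := hq'.2
      simpa [List.count_cons, hne] using this

lemma pvUniqueDict_items (sigs : List String) :
    (pvUniqueDict sigs).items
      = ((PySem.List.enumerate sigs).filter
          (fun p => (PySem.Dict.counter sigs).getD p.2 0 == 1)).map (fun p => (p.2, p.1)) := by
  unfold pvUniqueDict
  rw [pvFoldInsertItems (fun s => (PySem.Dict.counter sigs).getD s 0 == 1)]
  · simp [PySem.Dict.empty]
  · intro p _ hP
    constructor
    · simp [PySem.Dict.contains, PySem.Dict.empty]
    · rw [PySem.List.map_snd_enumerate]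
      rw [PySem.Dict.getD_counter] at hP
      have : (List.count p.2 sigs : Int) = 1 := by simpa using hP
      exact_mod_cast this

lemma pvUniqueDict_keys (sigs : List String) :
    (pvUniqueDict sigs).keys
      = ((PySem.List.enumerate sigs).filter
          (fun p => (PySem.Dict.counter sigs).getD p.2 0 == 1)).map (fun p => p.2) := by
  simp [PySem.Dict.keys, pvUniqueDict_items, List.map_map, Function.comp]

lemma pvUniqueDict_keys_nodup (sigs : List String) : (pvUniqueDict sigs).keys.Nodup := by
  rw [pvUniqueDict_keys, List.nodup_iff_count_le_one]
  intro s
  by_cases hs : s ∈ ((PySem.List.enumerate sigs).filter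
      (fun p => (PySem.Dict.counter sigs).getD p.2 0 == 1)).map (fun p => p.2)
  · obtain ⟨p, hp, hps⟩ := List.mem_map.mp hs
    have hP := (List.mem_filter.mp hp).2
    rw [hps, PySem.Dict.getD_counter] at hP
    have hc1 : List.count s sigs = 1 := by
      have : (List.count s sigs : Int) = 1 := by simpa using hP
      exact_mod_cast this
    have hsub : (((PySem.List.enumerate sigs).filter
        (fun p => (PySem.Dict.counter sigs).getD p.2 0 == 1)).map (fun p => p.2)).Sublist sigs := by
      have := (List.filter_sublist (l := PySem.List.enumerate sigs)
        (p := fun p => (PySem.Dict.counter sigs).getD p.2 0 == 1)).map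
          (f := fun p : Int × String => p.2)
      simpa [PySem.List.map_snd_enumerate] using this
    calc List.count s _ ≤ List.count s sigs := hsub.count_le s
      _ = 1 := hc1
  · rw [List.count_eq_zero_of_not_mem hs]
    exact Nat.zero_le 1

-- mapping a lookup over the (nodup) filtered keys of a dict is mapping over its filtered items
lemma pvMapGetDKeys :
    ∀ (l : List (String × Int)), (l.map Prod.fst).Nodup →
      ∀ (c : String → Bool) (g : String → Int → Int × Int),
      ((l.map Prod.fst).filter c).map (fun s => g s ((PySem.Dict.mk l).getD s 0))
        = (l.filter (fun kv => c kv.1)).map (fun kv => g kv.1 kv.2) := by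
  intro l
  induction l with
  | nil => intro _ c g; simp
  | cons kv t ih =>
    intro hnd c g
    have hnd2 : (kv.1 :: t.map Prod.fst).Nodup := by simpa using hnd
    have hk : kv.1 ∉ t.map Prod.fst := (List.nodup_cons.mp hnd2).1
    have hnd' : (t.map Prod.fst).Nodup := (List.nodup_cons.mp hnd2).2
    have hrest : ∀ s ∈ (t.map Prod.fst).filter c,
        g s ((PySem.Dict.mk (kv :: t)).getD s 0) = g s ((PySem.Dict.mk t).getD s 0) := by
      intro s hsf
      have hs : s ∈ t.map Prod.fst := List.mem_of_mem_filter hsf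
      have hne : s ≠ kv.1 := fun h => hk (h ▸ hs)
      have hget : (PySem.Dict.mk (kv :: t)).get? s = (PySem.Dict.mk t).get? s := by
        have := PySem.Dict.get?_mk_cons kv.1 kv.2 t s
        simpa [show (kv.1 == s) = false by simp [hne.symm]] using this
      simp [PySem.Dict.getD, hget]
    have hcons : List.map Prod.fst (kv :: t) = kv.1 :: t.map Prod.fst := by simp
    by_cases hck : c kv.1 = true
    · rw [hcons, List.filter_cons_of_pos hck,
        List.filter_cons_of_pos (p := fun kv : String × Int => c kv.1) (a := kv) (l := t)
          (show (fun kv : String × Int => c kv.1) kv = true from hck),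
        List.map_cons, List.map_cons]
      congr 1
      · show g kv.1 ((PySem.Dict.mk (kv :: t)).getD kv.1 0) = g kv.1 kv.2
        have hget : (PySem.Dict.mk (kv :: t)).get? kv.1 = some kv.2 := by
          have := PySem.Dict.get?_mk_cons kv.1 kv.2 t kv.1
          simpa using this
        simp [PySem.Dict.getD, hget]
      · rw [List.map_congr_left hrest, ih hnd' c g]
    · have hck' : ¬ c kv.1 = true := hck
      rw [hcons, List.filter_cons_of_neg hck',
        List.filter_cons_of_neg (p := fun kv : String × Int => c kv.1) (a := kv) (l := t)
          (show ¬ (fun kv : String × Int => c kv.1) kv = true from hck')]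
      rw [List.map_congr_left hrest, ih hnd' c g]

lemma pvA_eq_CF (current_sigs desired_sigs : List String) :
    unique_anchor_pairs_py current_sigs desired_sigs = pvCF current_sigs desired_sigs := by
  unfold unique_anchor_pairs_py
  simp only []
  rw [PySem.Set.ofList_eq_self_of_nodup _ (pvUniqueDict_keys_nodup current_sigs)]
  have hcc : ∀ s : String,
      PySem.Set.contains (pvUniqueDict desired_sigs).keys s
        = (pvUniqueDict desired_sigs).contains s := by
    intro s
    rw [Bool.eq_iff_iff, PySem.Set.contains_iff, PySem.Dict.contains_iff_mem_keys]
  have hinter : PySem.Set.inter (pvUniqueDict current_sigs).keys (pvUniqueDict desired_sigs).keys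
      = ((pvUniqueDict current_sigs).items.map Prod.fst).filter
          (fun s => (pvUniqueDict desired_sigs).contains s) := by
    show ((pvUniqueDict current_sigs).keys).filter
        (fun s => PySem.Set.contains (pvUniqueDict desired_sigs).keys s) = _
    rw [List.filter_congr (fun s _ => hcc s)]
    rfl
  rw [hinter]
  have hmap := pvMapGetDKeys (pvUniqueDict current_sigs).items
    (by simpa [PySem.Dict.keys] using pvUniqueDict_keys_nodup current_sigs)
    (fun s => (pvUniqueDict desired_sigs).contains s)
    (fun s v => (v, (pvUniqueDict desired_sigs).getD s 0))
  have hmk : PySem.Dict.mk (pvUniqueDict current_sigs).items = pvUniqueDict current_sigs := rfl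
  rw [hmk] at hmap
  rw [hmap, pvUniqueDict_items current_sigs]
  have hlist :
      ((((PySem.List.enumerate current_sigs).filter
            (fun p => (PySem.Dict.counter current_sigs).getD p.2 0 == 1)).map
          (fun p : Int × String => (p.2, p.1))).filter
        (fun kv => (pvUniqueDict desired_sigs).contains kv.1)).map
          (fun kv => (kv.2, (pvUniqueDict desired_sigs).getD kv.1 0))
        = pvCF current_sigs desired_sigs := by
    unfold pvCF
    rw [List.filter_map, List.map_map, List.filter_filter]
    rfl
  rw [hlist]
  have hpair : List.Pairwise (fun a b : Int × Int => a.1 < b.1)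
      (pvCF current_sigs desired_sigs) := by
    unfold pvCF
    exact ((PySem.List.pairwise_lt_enumerate current_sigs 0).filter _).map _ (fun a b h => h)
  exact PySem.List.sorted_eq_of_perm_of_pairwise_lt _ _ _ (List.Perm.refl _) hpair

lemma pvB_eq_CF (current_sigs desired_sigs : List String) :
    unique_anchor_pairs_py_alt current_sigs desired_sigs = pvCF current_sigs desired_sigs := by
  unfold unique_anchor_pairs_py_alt
  simp only []
  rw [PySem.List.foldl_append_if
    (fun p : Int × String => (PySem.Dict.counter current_sigs).getD p.2 0 == 1
      && (pvUniqueDict desired_sigs).contains p.2)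
    (fun p : Int × String => (p.1, (pvUniqueDict desired_sigs).getD p.2 0))
    (PySem.List.enumerate current_sigs) []]
  unfold pvCF
  rw [List.nil_append,
    List.filter_congr (fun p _ => Bool.and_comm
      ((PySem.Dict.counter current_sigs).getD p.2 0 == 1)
      ((pvUniqueDict desired_sigs).contains p.2))]

-- ===== VERDICT (by name: the statement is the Claim_ definition above) =====
theorem unique_anchor_pairs_py_spec : Claim_equal_unique_anchor_pairs_py := by
  intro current_sigs desired_sigs _
  unfold Spec_unique_anchor_pairs_py
  rw [pvA_eq_CF, pvB_eq_CF]
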